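-- pv_equiv track=rewrite | github.com/jsosao/Drewski2423_DrewLive | tv.py | remove_sd_entries
-- ===== SOURCE A (Python) =====
-- def remove_sd_entries(lines):
--     cleaned = []
--     skip_next = False
--     for line in lines:
--         if skip_next:
--             skip_next = False
--             continue
--         if line.strip().startswith("#EXTINF") and "SD" in line.upper():
--             skip_next = True
--             continue
--         cleaned.append(line)
--     return cleaned
-- ===== SOURCE B (Python) =====
-- def remove_sd_entries(lines):
--     drop = set()
--     for i, line in enumerate(lines):
--         if i in drop:
--             continue
--         if line.strip().startswith("#EXTINF") and "SD" in line.upper():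
--             drop.add(i)
--             drop.add(i + 1)
--     return [line for i, line in enumerate(lines) if i not in drop]
-- ===== Notes on version B (the rewrite author's own statement) =====
-- stated objective: alternative
-- what changed: Replaced the single-pass skip_next state machine by two staged passes over an index set: a first pass marks the indices of SD entries and their successors in a set, a second pass (a comprehension) keeps exactly the unmarked indices.
import Mathlib
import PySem

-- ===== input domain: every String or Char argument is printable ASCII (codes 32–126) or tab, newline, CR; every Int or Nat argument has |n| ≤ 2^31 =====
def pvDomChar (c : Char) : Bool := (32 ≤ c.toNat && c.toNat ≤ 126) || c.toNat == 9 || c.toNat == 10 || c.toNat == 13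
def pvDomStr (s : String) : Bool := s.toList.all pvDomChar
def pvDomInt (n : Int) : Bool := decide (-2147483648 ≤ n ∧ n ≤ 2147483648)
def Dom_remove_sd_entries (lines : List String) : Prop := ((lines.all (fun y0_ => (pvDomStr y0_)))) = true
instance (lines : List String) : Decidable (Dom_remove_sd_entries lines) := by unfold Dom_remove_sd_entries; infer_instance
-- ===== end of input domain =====

-- B replaces A's single-pass skip_next state machine by two staged passes over an index set
-- (mark dropped indices, then filter by index); objective: alternative (same O(n) cost).

-- line.strip().startswith("#EXTINF") and "SD" in line.upper()
def pvIsSD (line : String) : Bool :=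
  PySem.Str.startswith (PySem.Str.strip line) "#EXTINF" && PySem.Str.isIn "SD" (PySem.Str.upper line)

-- ===== PORT A =====
-- fold over lines with state (cleaned, skip_next), exactly A's branches
def pvStepA (s : List String × Bool) (line : String) : List String × Bool :=
  if s.2 then (s.1, false)
  else if pvIsSD line then (s.1, true)
  else (s.1 ++ [line], false)

def remove_sd_entries (lines : List String) : List String :=
  (lines.foldl pvStepA ([], false)).1

-- ===== PORT B =====
-- first pass: mark the index of each SD entry and its successor in a set
def pvMarkStep (s : PySem.Set Int) (p : Int × String) : PySem.Set Int :=
  if s.contains p.1 then s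
  else if pvIsSD p.2 then PySem.Set.add (PySem.Set.add s p.1) (p.1 + 1)
  else s

-- second pass: keep exactly the lines whose index is unmarked
def remove_sd_entries_alt (lines : List String) : List String :=
  let drop : PySem.Set Int := (PySem.List.enumerate lines).foldl pvMarkStep PySem.Set.empty
  ((PySem.List.enumerate lines).filter (fun p => !(PySem.Set.contains drop p.1))).map (·.2)

-- ===== PRECONDITION & SPEC =====
def Spec_remove_sd_entries (lines : List String) (out : List String) : Prop := out = remove_sd_entries_alt lines
instance (lines : List String) (out : List String) : Decidable (Spec_remove_sd_entries lines out) := by unfold Spec_remove_sd_entries; infer_instance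

-- ===== CLAIM (what is proved, stated in full; the proofs are below) =====
def Claim_equal_remove_sd_entries : Prop := ∀ (lines : List String), Dom_remove_sd_entries lines → Spec_remove_sd_entries lines (remove_sd_entries lines)

-- ===== LEMMAS AND PROOFS =====

-- common reference behaviour: flag-indexed recursion
def pvRec : List String → Bool → List String
  | [], _ => []
  | _ :: ls, true => pvRec ls false
  | l :: ls, false => if pvIsSD l then pvRec ls true else l :: pvRec ls false

-- the indices dropped when scanning from index n with incoming flag b
def pvDrops : Int → List String → Bool → List Int
  | n, [], b => if b then [n] else []
  | n, l :: ls, b =>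
      if b then n :: pvDrops (n + 1) ls false
      else if pvIsSD l then n :: pvDrops (n + 1) ls true
      else pvDrops (n + 1) ls false

theorem pvDrops_nil (n : Int) (b : Bool) : pvDrops n [] b = if b then [n] else [] := rfl

theorem pvDrops_cons (n : Int) (l : String) (ls : List String) (b : Bool) :
    pvDrops n (l :: ls) b =
      if b then n :: pvDrops (n + 1) ls false
      else if pvIsSD l then n :: pvDrops (n + 1) ls true
      else pvDrops (n + 1) ls false := rfl

theorem pvRec_nil (b : Bool) : pvRec [] b = [] := rfl

theorem pvRec_cons (l : String) (ls : List String) (b : Bool) :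
    pvRec (l :: ls) b =
      if b then pvRec ls false
      else if pvIsSD l then pvRec ls true
      else l :: pvRec ls false := by
  cases b <;> rfl

theorem pvDrops_ge (ls : List String) : ∀ (n j : Int) (b : Bool), j ∈ pvDrops n ls b → n ≤ j := by
  induction ls with
  | nil =>
      intro n j b h
      rw [pvDrops_nil] at h
      split at h
      · simp at h; omega
      · simp at h
  | cons l ls ih =>
      intro n j b h
      rw [pvDrops_cons] at h
      split_ifs at h with h1 h2
      · rcases List.mem_cons.1 h with h' | h'
        · omega
        · have := ih (n + 1) j _ h'; omega
      · rcases List.mem_cons.1 h with h' | h'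
        · omega
        · have := ih (n + 1) j _ h'; omega
      · have := ih (n + 1) j _ h; omega

theorem pvMark_mono (ps : List (Int × String)) :
    ∀ (s : PySem.Set Int) (j : Int), j ∈ s → j ∈ ps.foldl pvMarkStep s := by
  induction ps with
  | nil => intro s j h; simpa using h
  | cons p ps ih =>
      intro s j h
      simp only [List.foldl_cons]
      apply ih
      unfold pvMarkStep
      split_ifs
      · exact h
      · rw [PySem.Set.mem_add, PySem.Set.mem_add]
        exact Or.inl (Or.inl h)
      · exact h

theorem pvMark_mem_ge (ls : List String) :
    ∀ (m : Int) (s : PySem.Set Int) (j : Int),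
      j ∈ (PySem.List.enumerate ls m).foldl pvMarkStep s → j ∈ s ∨ m ≤ j := by
  induction ls with
  | nil => intro m s j h; simp [PySem.List.enumerate_nil] at h; exact Or.inl h
  | cons l ls ih =>
      intro m s j h
      rw [PySem.List.enumerate_cons, List.foldl_cons] at h
      rcases ih (m + 1) _ j h with h' | h'
      · have hstepmem : j ∈ s ∨ j = m ∨ j = m + 1 := by
          unfold pvMarkStep at h'
          split_ifs at h' with h1 h2
          · exact Or.inl h'
          · rw [PySem.Set.mem_add, PySem.Set.mem_add] at h'
            rcases h' with (h'' | h'') | h''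
            · exact Or.inl h''
            · exact Or.inr (Or.inl h'')
            · exact Or.inr (Or.inr h'')
          · exact Or.inl h'
        rcases hstepmem with h'' | h'' | h''
        · exact Or.inl h''
        · omega
        · omega
      · right; omega

-- characterisation of the marking pass by pvDrops
theorem pvMark_char (ls : List String) :
    ∀ (n : Int) (s : PySem.Set Int) (b : Bool),
      (n ∈ s ↔ b = true) → (∀ j ∈ s, j ≤ n) →
      ∀ j, n ≤ j →
        (j ∈ (PySem.List.enumerate ls n).foldl pvMarkStep s ↔ j ∈ pvDrops n ls b) := by
  induction ls with
  | nil =>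
      intro n s b hb hle j hj
      simp only [PySem.List.enumerate_nil, List.foldl_nil]
      rw [pvDrops_nil]
      constructor
      · intro hjs
        have hjn : j = n := le_antisymm (hle j hjs) hj
        subst hjn
        have hbt : b = true := hb.1 hjs
        simp [hbt]
      · intro hd
        split at hd
        · simp at hd
          subst hd
          exact hb.2 (by assumption)
        · simp at hd
  | cons l ls ih =>
      intro n s b hb hle j hj
      rw [PySem.List.enumerate_cons, List.foldl_cons, pvDrops_cons]
      cases b with
      | true =>
          have hmemn : n ∈ s := hb.2 rfl
          have hstep : pvMarkStep s (n, l) = s := by unfold pvMarkStep; simp [hmemn]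
          rw [hstep, if_pos rfl]
          have hnotmem : ¬ (n + 1) ∈ s := fun h => by have := hle _ h; omega
          have ihh := ih (n + 1) s false (by simp [hnotmem]) (fun j hj => by have := hle j hj; omega)
          by_cases hjn : j = n
          · subst hjn
            simp only [List.mem_cons, true_or, iff_true]
            exact pvMark_mono _ s j hmemn
          · rw [ihh j (by omega)]
            constructor
            · intro h; exact List.mem_cons.2 (Or.inr h)
            · intro h
              rcases List.mem_cons.1 h with h' | h'
              · omega
              · exact h'
      | false =>
          have hnmem : ¬ n ∈ s := fun h => by simpa using hb.1 h
          by_cases hsd : pvIsSD l = true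
          · have hstep : pvMarkStep s (n, l) = PySem.Set.add (PySem.Set.add s n) (n + 1) := by
              unfold pvMarkStep; simp [hsd, hnmem]
            rw [hstep, if_neg (by simp), if_pos hsd]
            set s' := PySem.Set.add (PySem.Set.add s n) (n + 1) with hs'
            have hmem1 : (n + 1) ∈ s' := by rw [hs', PySem.Set.mem_add]; exact Or.inr rfl
            have hle' : ∀ j ∈ s', j ≤ n + 1 := by
              intro j hj
              rw [hs', PySem.Set.mem_add, PySem.Set.mem_add] at hj
              rcases hj with (h | h) | h
              · have := hle j h; omega
              · omega
              · omega
            have ihh := ih (n + 1) s' true (by simp [hmem1]) hle'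
            by_cases hjn : j = n
            · subst hjn
              simp only [List.mem_cons, true_or, iff_true]
              exact pvMark_mono _ s' j
                (by rw [hs', PySem.Set.mem_add, PySem.Set.mem_add]; exact Or.inl (Or.inr rfl))
            · rw [ihh j (by omega)]
              constructor
              · intro h; exact List.mem_cons.2 (Or.inr h)
              · intro h
                rcases List.mem_cons.1 h with h' | h'
                · omega
                · exact h'
          · have hstep : pvMarkStep s (n, l) = s := by unfold pvMarkStep; simp [hsd, hnmem]
            rw [hstep, if_neg (by simp), if_neg hsd]
            have hnotmem : ¬ (n + 1) ∈ s := fun h => by have := hle _ h; omega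
            have ihh := ih (n + 1) s false (by simp [hnotmem]) (fun j hj => by have := hle j hj; omega)
            by_cases hjn : j = n
            · subst hjn
              constructor
              · intro h
                rcases pvMark_mem_ge ls (j + 1) s j h with h' | h'
                · exact absurd h' hnmem
                · omega
              · intro h
                have := pvDrops_ge ls (j + 1) j false h
                omega
            · exact ihh j (by omega)

-- characterisation of the filtering pass
theorem pvFilt_char (ls : List String) :
    ∀ (n : Int) (S : List Int) (b : Bool),
      (∀ j, n ≤ j → (j ∈ S ↔ j ∈ pvDrops n ls b)) →
      ((PySem.List.enumerate ls n).filter (fun p => !(PySem.Set.contains S p.1))).map (·.2)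
        = pvRec ls b := by
  induction ls with
  | nil => intro n S b _; simp [PySem.List.enumerate_nil, pvRec_nil]
  | cons l ls ih =>
      intro n S b hS
      rw [PySem.List.enumerate_cons]
      have hn := hS n le_rfl
      rw [pvDrops_cons] at hn
      cases b with
      | true =>
          have hmem : n ∈ S := hn.2 (by rw [if_pos rfl]; exact List.mem_cons_self)
          have hc : PySem.Set.contains S n = true := by
            simpa [PySem.Set.contains, List.contains_eq_mem] using hmem
          have htail : ∀ j, n + 1 ≤ j → (j ∈ S ↔ j ∈ pvDrops (n + 1) ls false) := by
            intro j hj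
            rw [hS j (by omega), pvDrops_cons, if_pos rfl]
            constructor
            · intro h
              rcases List.mem_cons.1 h with h' | h'
              · omega
              · exact h'
            · intro h; exact List.mem_cons.2 (Or.inr h)
          simp only [List.filter_cons, hc, Bool.not_true]
          rw [if_neg (by simp)]
          rw [ih (n + 1) S false htail, pvRec_cons, if_pos rfl]
      | false =>
          by_cases hsd : pvIsSD l = true
          · have hmem : n ∈ S := by
              apply hn.2
              rw [if_neg (by simp), if_pos hsd]
              exact List.mem_cons_self
            have hc : PySem.Set.contains S n = true := by
              simpa [PySem.Set.contains, List.contains_eq_mem] using hmem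
            have htail : ∀ j, n + 1 ≤ j → (j ∈ S ↔ j ∈ pvDrops (n + 1) ls true) := by
              intro j hj
              rw [hS j (by omega), pvDrops_cons, if_neg (by simp), if_pos hsd]
              constructor
              · intro h
                rcases List.mem_cons.1 h with h' | h'
                · omega
                · exact h'
              · intro h; exact List.mem_cons.2 (Or.inr h)
            simp only [List.filter_cons, hc, Bool.not_true]
            rw [if_neg (by simp)]
            rw [ih (n + 1) S true htail, pvRec_cons, if_neg (by simp), if_pos hsd]
          · have hmem : ¬ n ∈ S := by
              intro h
              have h' := hn.1 h
              rw [if_neg (by simp), if_neg hsd] at h'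
              have := pvDrops_ge ls (n + 1) n false h'
              omega
            have hc : PySem.Set.contains S n = false := by
              simpa [PySem.Set.contains, List.contains_eq_mem] using hmem
            have htail : ∀ j, n + 1 ≤ j → (j ∈ S ↔ j ∈ pvDrops (n + 1) ls false) := by
              intro j hj
              rw [hS j (by omega), pvDrops_cons, if_neg (by simp), if_neg hsd]
            simp only [List.filter_cons, hc, Bool.not_false, if_true, List.map_cons]
            rw [ih (n + 1) S false htail, pvRec_cons, if_neg (by simp), if_neg hsd]

-- B equals the reference recursion
theorem pvB_eq_rec (lines : List String) : remove_sd_entries_alt lines = pvRec lines false := by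
  unfold remove_sd_entries_alt
  apply pvFilt_char
  intro j hj
  exact pvMark_char lines 0 PySem.Set.empty false (by simp [PySem.Set.empty])
    (by simp [PySem.Set.empty]) j hj

-- A equals the reference recursion (fold invariant over the skip_next flag)
theorem pvA_key (lines : List String) :
    ∀ acc : List String,
      (lines.foldl pvStepA (acc, false)).1 = acc ++ pvRec lines false ∧
      (lines.foldl pvStepA (acc, true)).1 = acc ++ pvRec lines true := by
  induction lines with
  | nil => intro acc; simp [pvRec_nil]
  | cons l rest ih =>
      intro acc
      constructor
      · by_cases h : pvIsSD l = true
        · have h1 : (l :: rest).foldl pvStepA (acc, false) = rest.foldl pvStepA (acc, true) := by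
            simp [List.foldl, pvStepA, h]
          rw [h1, (ih acc).2, pvRec_cons, if_neg (by simp), if_pos h]
        · have h1 : (l :: rest).foldl pvStepA (acc, false) = rest.foldl pvStepA (acc ++ [l], false) := by
            simp [List.foldl, pvStepA, h]
          rw [h1, (ih (acc ++ [l])).1, pvRec_cons, if_neg (by simp), if_neg h]
          simp
      · have h2 : (l :: rest).foldl pvStepA (acc, true) = rest.foldl pvStepA (acc, false) := by
          simp [List.foldl, pvStepA]
        rw [h2, (ih acc).1, pvRec_cons, if_pos rfl]

-- ===== VERDICT (by name: the statement is the Claim_ definition above) =====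
theorem remove_sd_entries_spec : Claim_equal_remove_sd_entries := by
  intro lines _
  unfold Spec_remove_sd_entries remove_sd_entries
  rw [pvB_eq_rec]
  simpa using (pvA_key lines []).1
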